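-- pv_equiv track=rewrite | github.com/SelinCelk12/Python_cough_datas_process | weighted_automation_with_two_options.py | detect_events
-- ===== SOURCE A (Python) =====
-- def detect_events(binary_signal, min_duration=500):
--     events = []
--     start = None
--     for i, val in enumerate(binary_signal):
--         if val == 1 and start is None:
--             start = i
--         elif val == 0 and start is not None:
--             end = i
--             # Olayın süresini kontrol et
--             if (end - start) >= min_duration:
--                 events.append((start, end))
--             start = None
--     if start is not None:
--         end = len(binary_signal)
--         if (end - start) >= min_duration:
--             events.append((start, end))
--     return events
-- ===== SOURCE B (Python) =====
-- def detect_events(binary_signal, min_duration=500):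
--     # Edge detection: collect rising-edge indices (starts) and falling-edge
--     # indices (ends) over the 0/1 samples, pad a trailing open run with the
--     # signal length, and zip them into events filtered by duration.
--     pairs = [(i, v) for i, v in enumerate(binary_signal) if v == 0 or v == 1]
--     prevs = [None] + [v for _, v in pairs]
--     starts = [i for (i, v), pv in zip(pairs, prevs) if v == 1 and pv != 1]
--     ends = [i for (i, v), pv in zip(pairs, prevs) if v == 0 and pv == 1]
--     if len(ends) < len(starts):
--         ends = ends + [len(binary_signal)]
--     return [(s, e) for s, e in zip(starts, ends) if e - s >= min_duration]
-- ===== Notes on version B (the rewrite author's own statement) =====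
-- stated objective: alternative
-- what changed: Replaces A's single stateful scan (Option start + accumulator) by edge detection: filter to 0/1 samples, compute rising/falling edge index lists via zip-with-previous comprehensions, pad a trailing open run with len(signal), and zip starts with ends filtering by duration.
import Mathlib
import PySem

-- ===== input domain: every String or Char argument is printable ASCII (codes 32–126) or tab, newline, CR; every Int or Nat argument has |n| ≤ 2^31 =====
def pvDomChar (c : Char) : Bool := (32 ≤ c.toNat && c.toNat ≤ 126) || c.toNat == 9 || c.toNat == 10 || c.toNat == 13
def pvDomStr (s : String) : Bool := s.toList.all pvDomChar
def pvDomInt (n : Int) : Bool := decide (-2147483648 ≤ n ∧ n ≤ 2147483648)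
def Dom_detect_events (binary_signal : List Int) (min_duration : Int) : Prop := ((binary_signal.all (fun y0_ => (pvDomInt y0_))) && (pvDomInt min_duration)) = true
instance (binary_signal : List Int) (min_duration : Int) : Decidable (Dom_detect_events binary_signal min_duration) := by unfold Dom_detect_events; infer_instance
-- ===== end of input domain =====

-- B replaces A's stateful scan by edge detection (filter to 0/1, zip-with-previous edge lists, zip starts/ends): an alternative decomposition, same cost.

-- ===== PORT A =====
-- loop body of A's for-loop: state = (events, start)
def stepA (min_duration : Int) (st : List (Int × Int) × Option Int) (p : Int × Int) :
    List (Int × Int) × Option Int :=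
  if p.2 = 1 ∧ st.2 = none then (st.1, some p.1)
  else if p.2 = 0 ∧ st.2 ≠ none then
    (match st.2 with
     | some s => ((if p.1 - s ≥ min_duration then st.1 ++ [(s, p.1)] else st.1), none)
     | none => st)
  else st

def detect_events (binary_signal : List Int) (min_duration : Int) : List (Int × Int) :=
  let r := (PySem.List.enumerate binary_signal).foldl (stepA min_duration) ([], none)
  match r.2 with
  | some s =>
      if (binary_signal.length : Int) - s ≥ min_duration then
        r.1 ++ [(s, (binary_signal.length : Int))]
      else r.1
  | none => r.1

-- ===== PORT B =====
def detect_events_alt (binary_signal : List Int) (min_duration : Int) : List (Int × Int) :=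
  let pairs := (PySem.List.enumerate binary_signal).filter (fun p => p.2 == 0 || p.2 == 1)
  let prevs : List (Option Int) := none :: pairs.map (fun p => some p.2)
  let starts := ((pairs.zip prevs).filter (fun q => q.1.2 == 1 && q.2 != some 1)).map (fun q => q.1.1)
  let ends := ((pairs.zip prevs).filter (fun q => q.1.2 == 0 && q.2 == some 1)).map (fun q => q.1.1)
  let ends2 := if ends.length < starts.length then ends ++ [(binary_signal.length : Int)] else ends
  (starts.zip ends2).filter (fun p => p.2 - p.1 ≥ min_duration)

-- ===== PRECONDITION & SPEC =====
def Spec_detect_events (binary_signal : List Int) (min_duration : Int) (out : List (Int × Int)) : Prop := out = detect_events_alt binary_signal min_duration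
instance (binary_signal : List Int) (min_duration : Int) (out : List (Int × Int)) : Decidable (Spec_detect_events binary_signal min_duration out) := by unfold Spec_detect_events; infer_instance

-- ===== CLAIM (what is proved, stated in full; the proofs are below) =====
def Claim_equal_detect_events : Prop := ∀ (binary_signal : List Int) (min_duration : Int), Dom_detect_events binary_signal min_duration → Spec_detect_events binary_signal min_duration (detect_events binary_signal min_duration)

-- ===== LEMMAS AND PROOFS =====

-- starts list of B, parameterised over the previous value
def SZ (p : Option Int) (ps : List (Int × Int)) : List Int :=
  ((ps.zip (p :: ps.map (fun q => some q.2))).filter (fun q => q.1.2 == 1 && q.2 != some 1)).map (fun q => q.1.1)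

-- ends list of B, parameterised over the previous value
def EZ (p : Option Int) (ps : List (Int × Int)) : List Int :=
  ((ps.zip (p :: ps.map (fun q => some q.2))).filter (fun q => q.1.2 == 0 && q.2 == some 1)).map (fun q => q.1.1)

-- B's final assembly
def glue (md n : Int) (a b : List Int) : List (Int × Int) :=
  (a.zip (if b.length < a.length then b ++ [n] else b)).filter (fun p => p.2 - p.1 ≥ md)

-- A's finalisation of the loop state
def finA (md n : Int) (st : List (Int × Int) × Option Int) : List (Int × Int) :=
  match st.2 with
  | some s => if n - s ≥ md then st.1 ++ [(s, n)] else st.1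
  | none => st.1

theorem SZ_cons (p : Option Int) (i v : Int) (r : List (Int × Int)) :
    SZ p ((i, v) :: r) = (if v = 1 ∧ p ≠ some 1 then [i] else []) ++ SZ (some v) r := by
  simp only [SZ, List.map_cons, List.zip_cons_cons, List.filter_cons]
  by_cases h1 : v = 1 <;> by_cases h2 : p = some 1 <;> simp [h1, h2]

theorem EZ_cons (p : Option Int) (i v : Int) (r : List (Int × Int)) :
    EZ p ((i, v) :: r) = (if v = 0 ∧ p = some 1 then [i] else []) ++ EZ (some v) r := by
  simp only [EZ, List.map_cons, List.zip_cons_cons, List.filter_cons]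
  by_cases h1 : v = 0 <;> by_cases h2 : p = some 1 <;> simp [h1, h2]

theorem glue_nil (md n : Int) : glue md n [] [] = [] := by simp [glue]

theorem glue_single (md n s : Int) :
    glue md n [s] [] = if n - s ≥ md then [(s, n)] else [] := by
  by_cases h : n - s ≥ md <;> simp [glue, h]

theorem glue_cons_cons (md n s i : Int) (a b : List Int) :
    glue md n (s :: a) (i :: b) =
      (if i - s ≥ md then [(s, i)] else []) ++ glue md n a b := by
  unfold glue
  have hl : (i :: b).length < (s :: a).length ↔ b.length < a.length := by simp
  by_cases h : b.length < a.length
  · simp only [hl, if_pos h, List.cons_append, List.zip_cons_cons, List.filter_cons]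
    by_cases hd : i - s ≥ md <;> simp [hd]
  · simp only [hl, if_neg h, List.zip_cons_cons, List.filter_cons]
    by_cases hd : i - s ≥ md <;> simp [hd]

-- the key invariant: A's loop + finalisation equals B's edge assembly, over any suffix
theorem key (md n : Int) : ∀ (rest : List Int) (k : Int) (acc : List (Int × Int)),
    (∀ p : Option Int, p ≠ some 1 →
      finA md n (List.foldl (stepA md) (acc, none) (PySem.List.enumerate rest k)) =
        acc ++ glue md n (SZ p ((PySem.List.enumerate rest k).filter (fun q => q.2 == 0 || q.2 == 1)))
                         (EZ p ((PySem.List.enumerate rest k).filter (fun q => q.2 == 0 || q.2 == 1)))) ∧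
    (∀ s : Int,
      finA md n (List.foldl (stepA md) (acc, some s) (PySem.List.enumerate rest k)) =
        acc ++ glue md n (s :: SZ (some 1) ((PySem.List.enumerate rest k).filter (fun q => q.2 == 0 || q.2 == 1)))
                         (EZ (some 1) ((PySem.List.enumerate rest k).filter (fun q => q.2 == 0 || q.2 == 1)))) := by
  intro rest
  induction rest with
  | nil =>
    intro k acc
    constructor
    · intro p hp
      simp [PySem.List.enumerate, finA, SZ, EZ, glue_nil]
    · intro s
      simp [PySem.List.enumerate, finA, SZ, EZ, glue_single]
      split <;> simp
  | cons v rest ih =>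
    intro k acc
    constructor
    · intro p hp
      rw [PySem.List.enumerate_cons, List.foldl_cons]
      by_cases h1 : v = 1
      · have hstep : stepA md (acc, none) (k, v) = (acc, some k) := by
          simp [stepA, h1]
        rw [hstep]
        have := (ih (k + 1) acc).2 k
        rw [this]
        have hc : ((k, v).2 == 0 || (k, v).2 == 1) = true := by simp [h1]
        simp only [List.filter_cons]
        rw [if_pos hc, SZ_cons, EZ_cons]
        simp [h1, hp]
      · by_cases h0 : v = 0
        · have hstep : stepA md (acc, none) (k, v) = (acc, none) := by
            simp [stepA, h0]
          rw [hstep]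
          have := (ih (k + 1) acc).1 (some v) (by simp [h0])
          rw [this]
          have hc : ((k, v).2 == 0 || (k, v).2 == 1) = true := by simp [h0]
          simp only [List.filter_cons]
          rw [if_pos hc, SZ_cons, EZ_cons]
          simp [h0, hp]
        · have hstep : stepA md (acc, none) (k, v) = (acc, none) := by
            simp [stepA, h0, h1]
          rw [hstep]
          have := (ih (k + 1) acc).1 p hp
          rw [this]
          have hc : ¬(((k, v).2 == 0 || (k, v).2 == 1) = true) := by simp [h0, h1]
          simp only [List.filter_cons]
          rw [if_neg hc]
    · intro s
      rw [PySem.List.enumerate_cons, List.foldl_cons]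
      by_cases h0 : v = 0
      · have hstep : stepA md (acc, some s) (k, v) =
            ((if k - s ≥ md then acc ++ [(s, k)] else acc), none) := by
          simp [stepA, h0]
        rw [hstep]
        have hf : ((k, v).2 == 0 || (k, v).2 == 1) = true := by simp [h0]
        simp only [List.filter_cons]
        rw [if_pos hf, SZ_cons, EZ_cons]
        simp only [h0]
        norm_num
        by_cases hd : k - s ≥ md
        · have := (ih (k + 1) (acc ++ [(s, k)])).1 (some v) (by simp [h0])
          rw [if_pos hd, this]
          rw [glue_cons_cons]
          simp [hd, h0]
        · have := (ih (k + 1) acc).1 (some v) (by simp [h0])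
          rw [if_neg hd, this]
          rw [glue_cons_cons]
          simp [hd, h0]
      · by_cases h1 : v = 1
        · have hstep : stepA md (acc, some s) (k, v) = (acc, some s) := by
            simp [stepA, h1]
          rw [hstep]
          have := (ih (k + 1) acc).2 s
          rw [this]
          have hc : ((k, v).2 == 0 || (k, v).2 == 1) = true := by simp [h1]
          simp only [List.filter_cons]
          rw [if_pos hc, SZ_cons, EZ_cons]
          simp [h1]
        · have hstep : stepA md (acc, some s) (k, v) = (acc, some s) := by
            simp [stepA, h0, h1]
          rw [hstep]
          have := (ih (k + 1) acc).2 s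
          rw [this]
          have hc : ¬(((k, v).2 == 0 || (k, v).2 == 1) = true) := by simp [h0, h1]
          simp only [List.filter_cons]
          rw [if_neg hc]

-- ===== VERDICT (by name: the statement is the Claim_ definition above) =====
theorem detect_events_spec : Claim_equal_detect_events := by
  intro sig md _
  unfold Spec_detect_events detect_events detect_events_alt
  have h := (key md (sig.length : Int) sig 0 []).1 none (by simp)
  simp only [finA] at h
  rw [h]
  simp [glue, SZ, EZ]
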